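-- pv_equiv track=rewrite | github.com/samarth20131/Practical-5 | Byte.py | unstuffing
-- ===== SOURCE A (Python) =====
-- def unstuffing(list1, esc):
--     list2 = []
--
--     del list1[0], list1[len(list1) - 1]
--     p = -1
--     for i in range(len(list1)):
--         if list1[i] == esc:
--             if i == p:
--                 list2.append(list1[i])
--             else:
--                 p = i + 1
--         else:
--             list2.append(list1[i])
--     str2 = "".join(list2)
--     return (str2)
-- ===== SOURCE B (Python) =====
-- def unstuffing(list1, esc):
--     # Same in-place mutation as the original: drop the flag bytes at both ends.
--     del list1[0], list1[len(list1) - 1]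
--     out = []
--     i = 0
--     n = len(list1)
--     while i < n:
--         if list1[i] == esc:
--             i += 1
--             if i < n:
--                 out.append(list1[i])
--             i += 1
--         else:
--             out.append(list1[i])
--             i += 1
--     return "".join(out)
-- ===== Notes on version B (the rewrite author's own statement) =====
-- stated objective: simpler
-- what changed: Replaces the expected-position counter p tracked against the for-range index with a while loop that consumes an escape and its following element as a pair, advancing the index by two; no position state is kept.
-- outside the precondition, e.g. on unstuffing(['F'], 'E'): A raises IndexError, B raises IndexError
import Mathlib
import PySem

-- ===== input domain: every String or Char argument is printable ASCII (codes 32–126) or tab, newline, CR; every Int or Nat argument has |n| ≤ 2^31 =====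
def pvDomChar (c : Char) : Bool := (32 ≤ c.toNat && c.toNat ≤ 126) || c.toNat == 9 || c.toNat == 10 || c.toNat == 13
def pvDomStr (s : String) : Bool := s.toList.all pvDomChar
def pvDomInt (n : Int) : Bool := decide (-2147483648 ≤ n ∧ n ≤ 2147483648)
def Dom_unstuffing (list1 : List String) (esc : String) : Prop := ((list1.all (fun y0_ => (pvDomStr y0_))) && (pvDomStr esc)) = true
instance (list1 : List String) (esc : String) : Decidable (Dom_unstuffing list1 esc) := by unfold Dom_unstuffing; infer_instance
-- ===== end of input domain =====

-- B replaces the expected-position counter p with a while loop that consumes an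
-- escape and its following element as a pair (objective: simpler, same cost).
-- Both Pythons mutate list1 in place identically (del of first and last element);
-- the equivalence proved here is about the return value.

-- ===== PORT A =====
-- A's loop body: state is (list2, p); i runs over range(len(l)).
def unstuffingStep (l : List String) (esc : String)
    (st : List String × Int) (i : Nat) : List String × Int :=
  if l.getD i "" = esc then
    if (i : Int) = st.2 then (st.1 ++ [l.getD i ""], st.2)
    else (st.1, (i : Int) + 1)
  else (st.1 ++ [l.getD i ""], st.2)

def unstuffing (list1 : List String) (esc : String) : String :=
  -- del list1[0], list1[len(list1)-1]  (raises unless 2 ≤ len; see Pre_)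
  let l := list1.tail.dropLast
  let st := (List.range l.length).foldl (unstuffingStep l esc) ([], -1)
  PySem.Str.join "" st.1

-- ===== PORT B =====
-- Source B's while loop: index recursion, consuming esc + following element as a pair.
def unstuffingGo (l : List String) (esc : String) (i : Nat) : List String :=
  if i < l.length then
    if l.getD i "" = esc then
      (if i + 1 < l.length then [l.getD (i + 1) ""] else []) ++ unstuffingGo l esc (i + 2)
    else l.getD i "" :: unstuffingGo l esc (i + 1)
  else []
termination_by l.length - i

def unstuffing_alt (list1 : List String) (esc : String) : String :=
  let l := list1.tail.dropLast
  PySem.Str.join "" (unstuffingGo l esc 0)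

-- ===== PRECONDITION & SPEC =====
-- A (and B) raise IndexError on the opening dels when len(list1) < 2.
def Pre_unstuffing (list1 : List String) (esc : String) : Prop := 2 ≤ list1.length
instance (list1 : List String) (esc : String) : Decidable (Pre_unstuffing list1 esc) := by
  unfold Pre_unstuffing; infer_instance
def pvWitness_unstuffing : List String × String := (["F", "a", "E", "b", "F"], "E")

def Spec_unstuffing (list1 : List String) (esc : String) (out : String) : Prop := out = unstuffing_alt list1 esc
instance (list1 : List String) (esc : String) (out : String) : Decidable (Spec_unstuffing list1 esc out) := by unfold Spec_unstuffing; infer_instance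

-- ===== CLAIM (what is proved, stated in full; the proofs are below) =====
def Claim_equal_unstuffing : Prop := ∀ (list1 : List String) (esc : String), Dom_unstuffing list1 esc → Pre_unstuffing list1 esc → Spec_unstuffing list1 esc (unstuffing list1 esc)

-- ===== LEMMAS AND PROOFS =====

-- "p points at the current index": append l[i] and continue with p unchanged.
def unstuffingGoP (l : List String) (esc : String) (i : Nat) : List String :=
  if i < l.length then l.getD i "" :: unstuffingGo l esc (i + 1) else []

theorem unstuffingGo_of_ge (l : List String) (esc : String) (i : Nat)
    (h : l.length ≤ i) : unstuffingGo l esc i = [] := by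
  unfold unstuffingGo
  simp [Nat.not_lt.mpr h]

theorem unstuffing_loop_eq (l : List String) (esc : String) :
    ∀ (k i : Nat) (acc : List String) (p : Int), i + k = l.length → p ≤ (i : Int) →
      ((List.range' i k).foldl (unstuffingStep l esc) (acc, p)).1 =
        acc ++ (if p = (i : Int) then unstuffingGoP l esc i else unstuffingGo l esc i) := by
  intro k
  induction k with
  | zero =>
    intro i acc p hlen _
    have hge : l.length ≤ i := by omega
    simp [List.range', unstuffingGoP, Nat.not_lt.mpr hge, unstuffingGo_of_ge l esc i hge]
  | succ k ih =>
    intro i acc p hlen hp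
    have hi : i < l.length := by omega
    rw [List.range'_succ, List.foldl_cons]
    by_cases hesc : l.getD i "" = esc
    · by_cases hpi : ((i : Int) = p)
      · -- p = i: append l[i], keep p; next index has p ≠ i+1
        have hstep : unstuffingStep l esc (acc, p) i = (acc ++ [l.getD i ""], p) := by
          unfold unstuffingStep; rw [if_pos hesc, if_pos hpi]
        rw [hstep, ih (i + 1) _ p (by omega) (by omega)]
        have hne : ¬ (p = ((i + 1 : Nat) : Int)) := by push_cast; omega
        rw [if_neg hne, if_pos hpi.symm]
        unfold unstuffingGoP
        rw [if_pos hi]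
        simp [List.append_assoc]
      · -- p < i, escape: skip it, set p := i+1
        have hstep : unstuffingStep l esc (acc, p) i = (acc, (i : Int) + 1) := by
          unfold unstuffingStep; rw [if_pos hesc, if_neg hpi]
        rw [hstep, ih (i + 1) _ ((i : Int) + 1) (by omega) (by push_cast; omega)]
        have heq : ((i : Int) + 1) = ((i + 1 : Nat) : Int) := by push_cast; ring
        have hne : ¬ (p = (i : Int)) := fun h => hpi h.symm
        rw [if_pos heq, if_neg hne]
        conv_rhs => rw [unstuffingGo]
        rw [if_pos hi, if_pos hesc]
        unfold unstuffingGoP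
        by_cases h2 : i + 1 < l.length
        · rw [if_pos h2, if_pos h2]; simp
        · rw [if_neg h2, if_neg h2, unstuffingGo_of_ge l esc (i + 2) (by omega)]
          simp
    · -- not an escape: append l[i], keep p
      have hstep : unstuffingStep l esc (acc, p) i = (acc ++ [l.getD i ""], p) := by
        unfold unstuffingStep; rw [if_neg hesc]
      rw [hstep, ih (i + 1) _ p (by omega) (by omega)]
      have hne : ¬ (p = ((i + 1 : Nat) : Int)) := by push_cast; omega
      rw [if_neg hne]
      by_cases hpi : p = (i : Int)
      · rw [if_pos hpi]
        unfold unstuffingGoP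
        rw [if_pos hi]
        simp [List.append_assoc]
      · rw [if_neg hpi]
        conv_rhs => rw [unstuffingGo]
        rw [if_pos hi, if_neg hesc]
        simp [List.append_assoc]

-- ===== VERDICT (by name: the statement is the Claim_ definition above) =====
theorem unstuffing_spec : Claim_equal_unstuffing := by
  intro list1 esc _ _
  unfold Spec_unstuffing unstuffing unstuffing_alt
  have h := unstuffing_loop_eq (list1.tail.dropLast) esc (list1.tail.dropLast).length 0 [] (-1)
    (by omega) (by omega)
  simp only [List.range_eq_range'] at h ⊢
  rw [h]
  norm_num
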